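-- pv_equiv track=rewrite | github.com/miroegres/AoC2025 | d09/p2.py | build_allowed_tiles
-- ===== SOURCE A (Python) =====
-- from collections import deque
--
-- def build_allowed_tiles(points):
--     """
--     Constructs the set of allowed tiles (red or green).
--
--     Green tiles are:
--       1) All tiles on straight path segments between consecutive red tiles
--          (wrapping), excluding the red endpoints.
--          Adjacent entries are guaranteed to be aligned horizontally or vertically.
--       2) All tiles strictly inside the loop formed by those red+green boundary tiles.
--
--     Returns:
--         allowed_set: set[(x, y)]
--         bbox: (minx, miny, maxx, maxy)
--     """
--     red = set(points)
--
--     # 1) Edge green tiles along segments between consecutive points (wrap)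
--     edge_green = set()
--     for i in range(len(points)):
--         x1, y1 = points[i]
--         x2, y2 = points[(i + 1) % len(points)]
--         if x1 == x2:
--             ya, yb = sorted((y1, y2))
--             for y in range(ya + 1, yb):
--                 edge_green.add((x1, y))
--         elif y1 == y2:
--             xa, xb = sorted((x1, x2))
--             for x in range(xa + 1, xb):
--                 edge_green.add((x, y1))
--         else:
--             raise ValueError("Input path must be axis-aligned between consecutive red tiles.")
--
--     boundary = red | edge_green
--     minx = min(x for x, _ in boundary)
--     maxx = max(x for x, _ in boundary)
--     miny = min(y for _, y in boundary)
--     maxy = max(y for _, y in boundary)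
--
--     # 2) Fill interior using flood fill from outside of the bounding box.
--     # We BFS from an exterior point and mark reachable 'outside' tiles.
--     # Any tile in the bbox that's not boundary and not outside is interior -> green.
--     bx0, bx1 = minx - 1, maxx + 1
--     by0, by1 = miny - 1, maxy + 1
--     outside = set()
--     q = deque([(bx0, by0)])
--     visited = set([(bx0, by0)])
--
--     while q:
--         x, y = q.popleft()
--         outside.add((x, y))
--         for dx, dy in ((1, 0), (-1, 0), (0, 1), (0, -1)):
--             nx, ny = x + dx, y + dy
--             if nx < bx0 or nx > bx1 or ny < by0 or ny > by1:
--                 continue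
--             if (nx, ny) in visited:
--                 continue
--             if (nx, ny) in boundary:
--                 continue
--             visited.add((nx, ny))
--             q.append((nx, ny))
--
--     inside_green = set()
--     for y in range(miny, maxy + 1):
--         for x in range(minx, maxx + 1):
--             if (x, y) in boundary:
--                 continue
--             if (x, y) in outside:
--                 continue
--             inside_green.add((x, y))
--
--     green = edge_green | inside_green
--     allowed = red | green
--     return allowed, (minx, miny, maxx, maxy)
-- ===== SOURCE B (Python) =====
-- def build_allowed_tiles(points):
--     # Label-propagation fill (repeated grid sweeps to a fixpoint) instead of BFS;
--     # segment pairs via zip with a rotated copy instead of modulo indexing.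
--     red = set(points)
--     edge_green = set()
--     for (x1, y1), (x2, y2) in zip(points, points[1:] + points[:1]):
--         if x1 == x2:
--             lo, hi = (y1, y2) if y1 <= y2 else (y2, y1)
--             for y in range(lo + 1, hi):
--                 edge_green.add((x1, y))
--         elif y1 == y2:
--             lo, hi = (x1, x2) if x1 <= x2 else (x2, x1)
--             for x in range(lo + 1, hi):
--                 edge_green.add((x, y1))
--         else:
--             raise ValueError("Input path must be axis-aligned between consecutive red tiles.")
--
--     boundary = red | edge_green
--     minx = min(x for x, _ in boundary)
--     maxx = max(x for x, _ in boundary)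
--     miny = min(y for _, y in boundary)
--     maxy = max(y for _, y in boundary)
--
--     # mark the exterior component by sweeping the expanded bbox until nothing changes
--     outside = {(minx - 1, miny - 1)}
--     changed = True
--     while changed:
--         changed = False
--         for y in range(miny - 1, maxy + 2):
--             for x in range(minx - 1, maxx + 2):
--                 c = (x, y)
--                 if c in outside or c in boundary:
--                     continue
--                 if ((x - 1, y) in outside or (x + 1, y) in outside
--                         or (x, y - 1) in outside or (x, y + 1) in outside):
--                     outside.add(c)
--                     changed = True
--
--     allowed = set(points)
--     allowed |= edge_green
--     for y in range(miny, maxy + 1):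
--         for x in range(minx, maxx + 1):
--             if (x, y) not in boundary and (x, y) not in outside:
--                 allowed.add((x, y))
--     return allowed, (minx, miny, maxx, maxy)
-- ===== Notes on version B (the rewrite author's own statement) =====
-- stated objective: alternative
-- what changed: The BFS flood fill (deque + visited set) is replaced by a label-propagation fill that sweeps the expanded bounding box row-major until a fixpoint, and the modulo-indexed segment loop is replaced by zipping the point list with its rotated copy.
-- outside the precondition, e.g. on build_allowed_tiles([]): A raises ValueError, B raises ValueError; on build_allowed_tiles([(0, 0), (1, 2)]): A raises ValueError, B raises ValueError
import Mathlib
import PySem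

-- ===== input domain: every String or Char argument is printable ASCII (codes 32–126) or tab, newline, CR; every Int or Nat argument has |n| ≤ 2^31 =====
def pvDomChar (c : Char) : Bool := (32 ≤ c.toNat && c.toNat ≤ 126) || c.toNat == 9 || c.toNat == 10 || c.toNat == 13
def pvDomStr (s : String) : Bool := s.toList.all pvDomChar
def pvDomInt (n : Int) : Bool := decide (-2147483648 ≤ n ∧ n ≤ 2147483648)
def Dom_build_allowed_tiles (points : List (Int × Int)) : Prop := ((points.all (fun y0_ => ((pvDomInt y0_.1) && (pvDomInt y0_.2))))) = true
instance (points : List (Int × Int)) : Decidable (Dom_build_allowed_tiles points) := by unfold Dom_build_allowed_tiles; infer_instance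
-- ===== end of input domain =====

-- B replaces the BFS flood fill by a label-propagation fill (whole-grid sweeps to a fixpoint)
-- and the modulo-indexed segment loop by a zip with a rotated copy; objective: alternative.

-- ===== PORT A =====
-- shared small helpers: the 4-neighbour offsets, the row-major cell grid, and the
-- termination measure (number of grid cells not yet in v) used by both fills

def pvNbrs : List (Int × Int) := [(1, 0), (-1, 0), (0, 1), (0, -1)]

def pvGrid (bx0 bx1 by0 by1 : Int) : List (Int × Int) :=
  (PySem.List.pyRange by0 (by1 + 1)).flatMap (fun y =>
    (PySem.List.pyRange bx0 (bx1 + 1)).map (fun x => (x, y)))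

def pvF (grid v : List (Int × Int)) : Nat := grid.countP (fun z => decide (z ∉ v))

lemma pv_mem_grid (bx0 bx1 by0 by1 : Int) (z : Int × Int) :
    z ∈ pvGrid bx0 bx1 by0 by1 ↔ bx0 ≤ z.1 ∧ z.1 ≤ bx1 ∧ by0 ≤ z.2 ∧ z.2 ≤ by1 := by
  obtain ⟨zx, zy⟩ := z
  simp only [pvGrid, List.mem_flatMap, List.mem_map, PySem.List.mem_pyRange_one, Prod.mk.injEq]
  constructor
  · rintro ⟨y, hy, x, hx, rfl, rfl⟩; omega
  · rintro ⟨h1, h2, h3, h4⟩; exact ⟨zy, by omega, zx, by omega, rfl, rfl⟩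

lemma pvCountP_lt {α : Type} (l : List α) (p q : α → Bool)
    (h : ∀ a ∈ l, q a = true → p a = true) (x : α) (hx : x ∈ l)
    (hp : p x = true) (hq : q x = false) : l.countP q < l.countP p := by
  induction l with
  | nil => simp at hx
  | cons a l ih =>
    rcases List.mem_cons.mp hx with rfl | hx'
    · have hmono : l.countP q ≤ l.countP p :=
        List.countP_mono_left (fun b hb => h b (List.mem_cons_of_mem _ hb))
      rw [List.countP_cons, List.countP_cons, if_pos hp, if_neg (by simp [hq])]
      omega
    · have := ih (fun b hb hqb => h b (List.mem_cons_of_mem _ hb) hqb) hx'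
      have hhead : q a = true → p a = true := h a (List.mem_cons_self)
      rw [List.countP_cons, List.countP_cons]
      by_cases hqa : q a = true
      · rw [if_pos hqa, if_pos (hhead hqa)]; omega
      · rw [if_neg hqa]; split <;> omega

lemma pvF_add_lt (grid v : List (Int × Int)) (n : Int × Int)
    (hg : n ∈ grid) (hv : n ∉ v) : pvF grid (PySem.Set.add v n) < pvF grid v := by
  refine pvCountP_lt grid _ _ ?_ n hg ?_ ?_
  · intro a _ ha
    simp only [decide_eq_true_eq] at ha ⊢
    exact fun hav => ha ((PySem.Set.mem_add v n a).mpr (Or.inl hav))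
  · simp only [decide_eq_true_eq]; exact hv
  · simp only [decide_eq_false_iff_not, not_not]
    exact (PySem.Set.mem_add v n n).mpr (Or.inr rfl)

def pvBfsStep (bx0 bx1 by0 by1 : Int) (boundary : List (Int × Int)) (c : Int × Int)
    (vq : List (Int × Int) × List (Int × Int)) (d : Int × Int) :
    List (Int × Int) × List (Int × Int) :=
  if c.1 + d.1 < bx0 ∨ c.1 + d.1 > bx1 ∨ c.2 + d.2 < by0 ∨ c.2 + d.2 > by1 then vq
  else if vq.1.contains (c.1 + d.1, c.2 + d.2) then vq
  else if boundary.contains (c.1 + d.1, c.2 + d.2) then vq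
  else (PySem.Set.add vq.1 (c.1 + d.1, c.2 + d.2), vq.2 ++ [(c.1 + d.1, c.2 + d.2)])

lemma pvBfsFold_measure (bx0 bx1 by0 by1 : Int) (boundary : List (Int × Int)) (c : Int × Int) :
    ∀ (ds : List (Int × Int)) (v q : List (Int × Int)),
      pvF (pvGrid bx0 bx1 by0 by1) (ds.foldl (pvBfsStep bx0 bx1 by0 by1 boundary c) (v, q)).1
        + (ds.foldl (pvBfsStep bx0 bx1 by0 by1 boundary c) (v, q)).2.length
      ≤ pvF (pvGrid bx0 bx1 by0 by1) v + q.length := by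
  intro ds
  induction ds with
  | nil => intro v q; simp
  | cons d ds ih =>
    intro v q
    rw [List.foldl_cons]
    rcases hstep : pvBfsStep bx0 bx1 by0 by1 boundary c (v, q) d with ⟨v', q'⟩
    unfold pvBfsStep at hstep
    dsimp only at hstep
    split at hstep
    · obtain ⟨rfl, rfl⟩ := Prod.mk.injEq .. ▸ hstep; exact ih v q
    · split at hstep
      · obtain ⟨rfl, rfl⟩ := Prod.mk.injEq .. ▸ hstep; exact ih v q
      · split at hstep
        · obtain ⟨rfl, rfl⟩ := Prod.mk.injEq .. ▸ hstep; exact ih v q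
        · rename_i hbox hvis hbnd
          obtain ⟨rfl, rfl⟩ := Prod.mk.injEq .. ▸ hstep
          have hmem : ((c.1 + d.1, c.2 + d.2) : Int × Int) ∈ pvGrid bx0 bx1 by0 by1 := by
            rw [pv_mem_grid]
            constructor
            · simp at hbox; omega
            · simp at hbox; exact ⟨by omega, by omega, by omega⟩
          have hnv : ((c.1 + d.1, c.2 + d.2) : Int × Int) ∉ v := by
            intro hmm
            exact hvis (List.contains_iff_mem.mpr hmm)
          have hlt := pvF_add_lt (pvGrid bx0 bx1 by0 by1) v _ hmem hnv
          have := ih (PySem.Set.add v (c.1 + d.1, c.2 + d.2)) (q ++ [(c.1 + d.1, c.2 + d.2)])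
          simp only [List.length_append, List.length_cons, List.length_nil] at this ⊢
          omega

def pvBfs (bx0 bx1 by0 by1 : Int) (boundary outside visited q : List (Int × Int)) :
    List (Int × Int) :=
  match q with
  | [] => outside
  | c :: q' =>
    let vq := pvNbrs.foldl (pvBfsStep bx0 bx1 by0 by1 boundary c) (visited, q')
    pvBfs bx0 bx1 by0 by1 boundary (PySem.Set.add outside c) vq.1 vq.2
termination_by pvF (pvGrid bx0 bx1 by0 by1) visited + q.length
decreasing_by
  have h := pvBfsFold_measure bx0 bx1 by0 by1 boundary c pvNbrs visited q'
  simp only [List.length_cons]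
  omega

def pvSegCellsA (x1 y1 x2 y2 : Int) : List (Int × Int) :=
  if x1 = x2 then
    (PySem.List.pyRange (min y1 y2 + 1) (max y1 y2)).map (fun y => (x1, y))
  else if y1 = y2 then
    (PySem.List.pyRange (min x1 x2 + 1) (max x1 x2)).map (fun x => (x, y1))
  else []  -- Python raises ValueError here; such inputs are excluded by Pre_

def pvEdgeA (points : List (Int × Int)) : PySem.Set (Int × Int) :=
  (List.range points.length).foldl (fun eg i =>
    let p1 := points.getD i (0, 0)
    let p2 := points.getD ((i + 1) % points.length) (0, 0)
    PySem.Set.update eg (pvSegCellsA p1.1 p1.2 p2.1 p2.2)) PySem.Set.empty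

def build_allowed_tiles (points : List (Int × Int)) :
    (List (Int × Int)) × (Int × Int × Int × Int) :=
  let red : PySem.Set (Int × Int) := PySem.Set.ofList points
  let edge_green : PySem.Set (Int × Int) := pvEdgeA points
  let boundary := PySem.Set.union red edge_green
  let minx := (PySem.List.min? (boundary.map Prod.fst) id).getD 0
  let maxx := (PySem.List.max? (boundary.map Prod.fst) id).getD 0
  let miny := (PySem.List.min? (boundary.map Prod.snd) id).getD 0
  let maxy := (PySem.List.max? (boundary.map Prod.snd) id).getD 0
  let bx0 := minx - 1
  let bx1 := maxx + 1
  let by0 := miny - 1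
  let by1 := maxy + 1
  let outside := pvBfs bx0 bx1 by0 by1 boundary PySem.Set.empty
    (PySem.Set.ofList [(bx0, by0)]) [(bx0, by0)]
  let inside_green :=
    (pvGrid minx maxx miny maxy).foldl (fun ig c =>
      if boundary.contains c then ig
      else if outside.contains c then ig
      else PySem.Set.add ig c) PySem.Set.empty
  let green := PySem.Set.union edge_green inside_green
  let allowed := PySem.Set.union red green
  (allowed, (minx, miny, maxx, maxy))

-- ===== PORT B =====

def pvSegCellsB (x1 y1 x2 y2 : Int) : List (Int × Int) :=
  if x1 = x2 then
    let lo := if y1 ≤ y2 then y1 else y2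
    let hi := if y1 ≤ y2 then y2 else y1
    (PySem.List.pyRange (lo + 1) hi).map (fun y => (x1, y))
  else if y1 = y2 then
    let lo := if x1 ≤ x2 then x1 else x2
    let hi := if x1 ≤ x2 then x2 else x1
    (PySem.List.pyRange (lo + 1) hi).map (fun x => (x, y1))
  else []  -- Python raises ValueError here; such inputs are excluded by Pre_

def pvSweepStep (boundary : List (Int × Int)) (oc : List (Int × Int) × Bool)
    (c : Int × Int) : List (Int × Int) × Bool :=
  if oc.1.contains c ∨ boundary.contains c then oc
  else if oc.1.contains (c.1 - 1, c.2) ∨ oc.1.contains (c.1 + 1, c.2)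
      ∨ oc.1.contains (c.1, c.2 - 1) ∨ oc.1.contains (c.1, c.2 + 1) then
    (PySem.Set.add oc.1 c, true)
  else oc

lemma pvSweepFold_measure (boundary grid : List (Int × Int)) :
    ∀ (cells : List (Int × Int)), (∀ z ∈ cells, z ∈ grid) →
    ∀ (o : List (Int × Int)) (b : Bool),
      pvF grid (cells.foldl (pvSweepStep boundary) (o, b)).1 ≤ pvF grid o ∧
      ((cells.foldl (pvSweepStep boundary) (o, b)).2 = true → b = false →
        pvF grid (cells.foldl (pvSweepStep boundary) (o, b)).1 < pvF grid o) := by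
  intro cells
  induction cells with
  | nil => intro _ o b; simp
  | cons z cells ih =>
    intro hz o b
    have hz' : ∀ w ∈ cells, w ∈ grid := fun w hw => hz w (List.mem_cons_of_mem _ hw)
    rw [List.foldl_cons]
    rcases hstep : pvSweepStep boundary (o, b) z with ⟨o', b'⟩
    unfold pvSweepStep at hstep
    dsimp only at hstep
    split at hstep
    · obtain ⟨rfl, rfl⟩ := Prod.mk.injEq .. ▸ hstep; exact ih hz' o b
    · split at hstep
      · rename_i hno _
        obtain ⟨rfl, rfl⟩ := Prod.mk.injEq .. ▸ hstep
        have hzg : z ∈ grid := hz z List.mem_cons_self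
        have hzo : z ∉ o := by
          intro hm; exact hno (Or.inl (List.contains_iff_mem.mpr hm))
        have hlt := pvF_add_lt grid o z hzg hzo
        have := ih hz' (PySem.Set.add o z) true
        exact ⟨by omega, fun _ _ => by omega⟩
      · obtain ⟨rfl, rfl⟩ := Prod.mk.injEq .. ▸ hstep; exact ih hz' o b

def pvSweepLoop (boundary grid outside : List (Int × Int)) : List (Int × Int) :=
  if (grid.foldl (pvSweepStep boundary) (outside, false)).2 then
    pvSweepLoop boundary grid (grid.foldl (pvSweepStep boundary) (outside, false)).1
  else (grid.foldl (pvSweepStep boundary) (outside, false)).1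
termination_by pvF grid outside
decreasing_by
  rename_i hoc
  rw [List.foldl_attach] at hoc ⊢
  exact (pvSweepFold_measure boundary grid grid (fun z hz => hz) outside false).2 hoc rfl

def pvEdgeB (points : List (Int × Int)) : PySem.Set (Int × Int) :=
  (points.zip (PySem.List.slice points (some 1) none ++
      PySem.List.slice points none (some 1))).foldl
    (fun eg pq => PySem.Set.update eg (pvSegCellsB pq.1.1 pq.1.2 pq.2.1 pq.2.2))
    PySem.Set.empty

def build_allowed_tiles_alt (points : List (Int × Int)) :
    (List (Int × Int)) × (Int × Int × Int × Int) :=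
  let red : PySem.Set (Int × Int) := PySem.Set.ofList points
  let edge_green : PySem.Set (Int × Int) := pvEdgeB points
  let boundary := PySem.Set.union red edge_green
  let minx := (PySem.List.min? (boundary.map Prod.fst) id).getD 0
  let maxx := (PySem.List.max? (boundary.map Prod.fst) id).getD 0
  let miny := (PySem.List.min? (boundary.map Prod.snd) id).getD 0
  let maxy := (PySem.List.max? (boundary.map Prod.snd) id).getD 0
  let outside := pvSweepLoop boundary (pvGrid (minx - 1) (maxx + 1) (miny - 1) (maxy + 1))
    (PySem.Set.ofList [(minx - 1, miny - 1)])
  let allowed0 := PySem.Set.union (PySem.Set.ofList points) edge_green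
  let allowed :=
    (pvGrid minx maxx miny maxy).foldl (fun al c =>
      if !boundary.contains c && !outside.contains c then PySem.Set.add al c else al)
      allowed0
  (allowed, (minx, miny, maxx, maxy))

-- ===== PRECONDITION & SPEC =====
-- Pre_ excludes the inputs on which the Python raises ValueError: the empty list (min() of an
-- empty set) and lists with a consecutive (wrapping) pair that is not axis-aligned.
def Pre_build_allowed_tiles (points : List (Int × Int)) : Prop :=
  points ≠ [] ∧ ∀ i : Nat, i < points.length →
    (points.getD i (0, 0)).1 = (points.getD ((i + 1) % points.length) (0, 0)).1 ∨
    (points.getD i (0, 0)).2 = (points.getD ((i + 1) % points.length) (0, 0)).2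

instance (points : List (Int × Int)) : Decidable (Pre_build_allowed_tiles points) := by
  unfold Pre_build_allowed_tiles; infer_instance

def pvWitness_build_allowed_tiles : (List (Int × Int)) := [(0, 0), (0, 2), (2, 2), (2, 0)]

def Spec_build_allowed_tiles (points : List (Int × Int))
    (out : (List (Int × Int)) × (Int × Int × Int × Int)) : Prop :=
  out = build_allowed_tiles_alt points

instance (points : List (Int × Int)) (out : (List (Int × Int)) × (Int × Int × Int × Int)) :
    Decidable (Spec_build_allowed_tiles points out) := by
  unfold Spec_build_allowed_tiles; infer_instance

-- ===== CLAIM (what is proved, stated in full; the proofs are below) =====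
def Claim_equal_build_allowed_tiles : Prop :=
  ∀ (points : List (Int × Int)), Dom_build_allowed_tiles points →
    Pre_build_allowed_tiles points →
    Spec_build_allowed_tiles points (build_allowed_tiles points)

-- ===== LEMMAS AND PROOFS =====

-- the step relation of the flood fill: move to a 4-neighbour inside the expanded
-- bounding box that is not a boundary tile (proof-layer definition only)
def pvInB (bx0 bx1 by0 by1 : Int) (d : Int × Int) : Prop :=
  bx0 ≤ d.1 ∧ d.1 ≤ bx1 ∧ by0 ≤ d.2 ∧ d.2 ≤ by1

def pvStepRel (bx0 bx1 by0 by1 : Int) (boundary : List (Int × Int)) (c d : Int × Int) : Prop :=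
  (∃ δ ∈ pvNbrs, d = (c.1 + δ.1, c.2 + δ.2)) ∧ pvInB bx0 bx1 by0 by1 d ∧ d ∉ boundary

lemma pvNbrs_neg {δ : Int × Int} (h : δ ∈ pvNbrs) : ((-δ.1, -δ.2) : Int × Int) ∈ pvNbrs := by
  simp only [pvNbrs, List.mem_cons, List.not_mem_nil, or_false] at h
  rcases h with rfl | rfl | rfl | rfl <;> simp [pvNbrs]

lemma pvBfsFold_props (bx0 bx1 by0 by1 : Int) (boundary : List (Int × Int)) (c : Int × Int) :
    ∀ (ds : List (Int × Int)), (∀ δ ∈ ds, δ ∈ pvNbrs) →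
    ∀ (v q : List (Int × Int)),
      (∀ x, x ∈ v → x ∈ (ds.foldl (pvBfsStep bx0 bx1 by0 by1 boundary c) (v, q)).1) ∧
      (∀ x, x ∈ q → x ∈ (ds.foldl (pvBfsStep bx0 bx1 by0 by1 boundary c) (v, q)).2) ∧
      (∀ x, x ∈ (ds.foldl (pvBfsStep bx0 bx1 by0 by1 boundary c) (v, q)).1 →
        x ∈ v ∨ (x ∈ (ds.foldl (pvBfsStep bx0 bx1 by0 by1 boundary c) (v, q)).2 ∧
          pvStepRel bx0 bx1 by0 by1 boundary c x)) ∧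
      (∀ x, x ∈ (ds.foldl (pvBfsStep bx0 bx1 by0 by1 boundary c) (v, q)).2 →
        x ∈ q ∨ x ∈ (ds.foldl (pvBfsStep bx0 bx1 by0 by1 boundary c) (v, q)).1) ∧
      (∀ δ ∈ ds, pvInB bx0 bx1 by0 by1 (c.1 + δ.1, c.2 + δ.2) →
        (c.1 + δ.1, c.2 + δ.2) ∉ boundary →
        (c.1 + δ.1, c.2 + δ.2) ∈ (ds.foldl (pvBfsStep bx0 bx1 by0 by1 boundary c) (v, q)).1) := by
  intro ds
  induction ds with
  | nil =>
    intro _ v q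
    refine ⟨fun x hx => hx, fun x hx => hx, fun x hx => Or.inl hx, fun x hx => Or.inl hx, ?_⟩
    intro δ hδ; simp at hδ
  | cons d ds ih =>
    intro hds v q
    have hds' : ∀ δ ∈ ds, δ ∈ pvNbrs := fun δ hδ => hds δ (List.mem_cons_of_mem _ hδ)
    rw [List.foldl_cons]
    rcases hstep : pvBfsStep bx0 bx1 by0 by1 boundary c (v, q) d with ⟨v', q'⟩
    unfold pvBfsStep at hstep
    dsimp only at hstep
    obtain ⟨m1, m2, m3, m4, m5⟩ := ih hds' v' q'
    split at hstep
    · -- out of box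
      rename_i hbox
      obtain ⟨rfl, rfl⟩ := Prod.mk.injEq .. ▸ hstep
      refine ⟨m1, m2, fun x hx => (m3 x hx).imp_right (fun h => h), m4, ?_⟩
      intro δ hδ hin hnb
      rcases List.mem_cons.mp hδ with rfl | hδ'
      · exact absurd hin (by simp only [pvInB] at *; omega)
      · exact m5 δ hδ' hin hnb
    · split at hstep
      · -- already visited
        rename_i hbox hvis
        obtain ⟨rfl, rfl⟩ := Prod.mk.injEq .. ▸ hstep
        refine ⟨m1, m2, fun x hx => (m3 x hx).imp_right (fun h => h), m4, ?_⟩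
        intro δ hδ hin hnb
        rcases List.mem_cons.mp hδ with rfl | hδ'
        · exact m1 _ (List.contains_iff_mem.mp hvis)
        · exact m5 δ hδ' hin hnb
      · split at hstep
        · -- boundary
          rename_i hbox hvis hbnd
          obtain ⟨rfl, rfl⟩ := Prod.mk.injEq .. ▸ hstep
          refine ⟨m1, m2, fun x hx => (m3 x hx).imp_right (fun h => h), m4, ?_⟩
          intro δ hδ hin hnb
          rcases List.mem_cons.mp hδ with rfl | hδ'
          · exact absurd (List.contains_iff_mem.mp hbnd) hnb
          · exact m5 δ hδ' hin hnb
        · -- pushed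
          rename_i hbox hvis hbnd
          obtain ⟨rfl, rfl⟩ := Prod.mk.injEq .. ▸ hstep
          have hnmem : ((c.1 + d.1, c.2 + d.2) : Int × Int) ∉ v :=
            fun hmm => hvis (List.contains_iff_mem.mpr hmm)
          have hnbnd : ((c.1 + d.1, c.2 + d.2) : Int × Int) ∉ boundary :=
            fun hmm => hbnd (List.contains_iff_mem.mpr hmm)
          have hstepRel : pvStepRel bx0 bx1 by0 by1 boundary c (c.1 + d.1, c.2 + d.2) := by
            refine ⟨⟨d, hds d List.mem_cons_self, rfl⟩, ?_, hnbnd⟩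
            simp only [pvInB]
            simp only [not_or, not_lt] at hbox
            exact ⟨by omega, by omega, by omega, by omega⟩
          constructor
          · exact fun x hx => m1 x ((PySem.Set.mem_add v _ x).mpr (Or.inl hx))
          constructor
          · exact fun x hx => m2 x (List.mem_append_left _ hx)
          constructor
          · intro x hx
            rcases m3 x hx with hxv | hrest
            · rcases (PySem.Set.mem_add v _ x).mp hxv with hxv' | rfl
              · exact Or.inl hxv'
              · exact Or.inr ⟨m2 _ (List.mem_append_right _ List.mem_cons_self), hstepRel⟩
            · exact Or.inr hrest
          constructor
          · intro x hx
            rcases m4 x hx with hxq | hxv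
            · rcases List.mem_append.mp hxq with hxq' | hxn
              · exact Or.inl hxq'
              · rcases List.mem_singleton.mp hxn with rfl
                exact Or.inr (m1 _ ((PySem.Set.mem_add v _ _).mpr (Or.inr rfl)))
            · exact Or.inr hxv
          · intro δ hδ hin hnb
            rcases List.mem_cons.mp hδ with rfl | hδ'
            · exact m1 _ ((PySem.Set.mem_add v _ _).mpr (Or.inr rfl))
            · exact m5 δ hδ' hin hnb

lemma pvBfs_spec (bx0 bx1 by0 by1 : Int) (boundary : List (Int × Int))
    (P : Int × Int → Prop)
    (hP : ∀ c d, P c → pvStepRel bx0 bx1 by0 by1 boundary c d → P d) :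
    ∀ (outside visited q : List (Int × Int)),
    (∀ x, x ∈ visited → x ∈ outside ∨ x ∈ q) →
    (∀ x, x ∈ outside → x ∈ visited) →
    (∀ x, x ∈ q → x ∈ visited) →
    (∀ x, x ∈ outside → ∀ d, pvStepRel bx0 bx1 by0 by1 boundary x d → d ∈ visited) →
    (∀ x, x ∈ visited → P x) →
    (∀ x, x ∈ visited → x ∈ pvBfs bx0 bx1 by0 by1 boundary outside visited q) ∧
    (∀ x, x ∈ pvBfs bx0 bx1 by0 by1 boundary outside visited q → P x) ∧
    (∀ x, x ∈ pvBfs bx0 bx1 by0 by1 boundary outside visited q →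
      ∀ d, pvStepRel bx0 bx1 by0 by1 boundary x d →
        d ∈ pvBfs bx0 bx1 by0 by1 boundary outside visited q) := by
  intro outside visited q
  induction outside, visited, q using pvBfs.induct bx0 bx1 by0 by1 boundary with
  | case1 outside visited =>
    intro h1 h2 hq h3 h5
    rw [pvBfs]
    refine ⟨?_, fun x hx => h5 x (h2 x hx), ?_⟩
    · intro x hx
      rcases h1 x hx with h | h
      · exact h
      · simp at h
    · intro x hx d hd
      rcases h1 _ (h3 x hx d hd) with h | h
      · exact h
      · simp at h
  | case2 outside visited c q' vq ih =>
    have hvq : vq = List.foldl (pvBfsStep bx0 bx1 by0 by1 boundary c) (visited, q') pvNbrs := rfl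
    intro h1 h2 hq h3 h5
    rw [pvBfs]
    obtain ⟨m1, m2, m3, m4, m5⟩ :=
      pvBfsFold_props bx0 bx1 by0 by1 boundary c pvNbrs (fun δ hδ => hδ) visited q'
    have hcv : c ∈ visited := hq c List.mem_cons_self
    have ih' := ih
      (by -- h1'
        intro x hx
        rcases m3 x hx with hxv | ⟨hxq, _⟩
        · rcases h1 x hxv with hxo | hxcq
          · exact Or.inl ((PySem.Set.mem_add outside c x).mpr (Or.inl hxo))
          · rcases List.mem_cons.mp hxcq with rfl | hxq'
            · exact Or.inl ((PySem.Set.mem_add outside x x).mpr (Or.inr rfl))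
            · exact Or.inr (m2 x hxq')
        · exact Or.inr hxq)
      (by -- h2'
        intro x hx
        rcases (PySem.Set.mem_add outside c x).mp hx with hxo | rfl
        · exact m1 x (h2 x hxo)
        · exact m1 x hcv)
      (by -- hq'
        intro x hx
        rcases m4 x hx with hxq' | hxv
        · exact m1 x (hq x (List.mem_cons_of_mem _ hxq'))
        · exact hxv)
      (by -- h3'
        intro x hx d hd
        rcases (PySem.Set.mem_add outside c x).mp hx with hxo | rfl
        · exact m1 d (h3 x hxo d hd)
        · obtain ⟨⟨δ, hδ, rfl⟩, hin, hnb⟩ := hd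
          exact m5 δ hδ hin hnb)
      (by -- h5'
        intro x hx
        rcases m3 x hx with hxv | ⟨_, hst⟩
        · exact h5 x hxv
        · exact hP c x (h5 c hcv) hst)
    exact ⟨fun x hx => ih'.1 x (m1 x hx), ih'.2.1, ih'.2.2⟩

lemma pvBfs_mem (bx0 bx1 by0 by1 : Int) (boundary : List (Int × Int)) (x : Int × Int) :
    x ∈ pvBfs bx0 bx1 by0 by1 boundary PySem.Set.empty
        (PySem.Set.ofList [(bx0, by0)]) [(bx0, by0)] ↔
      Relation.ReflTransGen (pvStepRel bx0 bx1 by0 by1 boundary) (bx0, by0) x := by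
  have hone : ∀ y : Int × Int, y ∈ (PySem.Set.ofList [((bx0 : Int), (by0 : Int))]) ↔ y = (bx0, by0) := by
    intro y
    rw [PySem.Set.mem_ofList]
    simp
  obtain ⟨c1, c2, c3⟩ := pvBfs_spec bx0 bx1 by0 by1 boundary
    (Relation.ReflTransGen (pvStepRel bx0 bx1 by0 by1 boundary) (bx0, by0))
    (fun c d hc hcd => hc.tail hcd)
    PySem.Set.empty (PySem.Set.ofList [(bx0, by0)]) [(bx0, by0)]
    (fun x hx => Or.inr (by rw [hone x] at hx; simp [hx]))
    (fun x hx => by simp [PySem.Set.empty] at hx)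
    (fun x hx => by rw [hone x]; simpa using hx)
    (fun x hx => by simp [PySem.Set.empty] at hx)
    (fun x hx => by rw [hone x] at hx; exact hx ▸ Relation.ReflTransGen.refl)
  constructor
  · exact c2 x
  · intro hr
    induction hr with
    | refl => exact c1 _ ((hone _).mpr rfl)
    | tail hr hstep ih => exact c3 _ ih _ hstep


lemma pvSweepFold_flag (boundary : List (Int × Int)) :
    ∀ (cells : List (Int × Int)) (o : List (Int × Int)),
      (cells.foldl (pvSweepStep boundary) (o, true)).2 = true := by
  intro cells
  induction cells with
  | nil => intro o; rfl
  | cons z cells ih =>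
    intro o
    rw [List.foldl_cons]
    rcases hstep : pvSweepStep boundary (o, true) z with ⟨o', b'⟩
    unfold pvSweepStep at hstep
    dsimp only at hstep
    split at hstep
    · obtain ⟨rfl, rfl⟩ := Prod.mk.injEq .. ▸ hstep; exact ih o
    · split at hstep
      · obtain ⟨rfl, rfl⟩ := Prod.mk.injEq .. ▸ hstep; exact ih (PySem.Set.add o z)
      · obtain ⟨rfl, rfl⟩ := Prod.mk.injEq .. ▸ hstep; exact ih o

lemma pvSweepFold_mono (boundary : List (Int × Int)) :
    ∀ (cells : List (Int × Int)) (o : List (Int × Int)) (b : Bool),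
      ∀ x ∈ o, x ∈ (cells.foldl (pvSweepStep boundary) (o, b)).1 := by
  intro cells
  induction cells with
  | nil => intro o b x hx; exact hx
  | cons z cells ih =>
    intro o b x hx
    rw [List.foldl_cons]
    rcases hstep : pvSweepStep boundary (o, b) z with ⟨o', b'⟩
    unfold pvSweepStep at hstep
    dsimp only at hstep
    split at hstep
    · obtain ⟨rfl, rfl⟩ := Prod.mk.injEq .. ▸ hstep; exact ih o b x hx
    · split at hstep
      · obtain ⟨rfl, rfl⟩ := Prod.mk.injEq .. ▸ hstep
        exact ih _ _ x ((PySem.Set.mem_add o z x).mpr (Or.inl hx))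
      · obtain ⟨rfl, rfl⟩ := Prod.mk.injEq .. ▸ hstep; exact ih o b x hx

lemma pvSweepFold_sound (bx0 bx1 by0 by1 : Int) (boundary : List (Int × Int))
    (P : Int × Int → Prop)
    (hP : ∀ c d, P c → pvStepRel bx0 bx1 by0 by1 boundary c d → P d) :
    ∀ (cells : List (Int × Int)), (∀ z ∈ cells, z ∈ pvGrid bx0 bx1 by0 by1) →
    ∀ (o : List (Int × Int)) (b : Bool), (∀ x ∈ o, P x) →
      ∀ x ∈ (cells.foldl (pvSweepStep boundary) (o, b)).1, P x := by
  intro cells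
  induction cells with
  | nil => intro _ o b ho x hx; exact ho x hx
  | cons z cells ih =>
    intro hz o b ho
    have hz' : ∀ w ∈ cells, w ∈ pvGrid bx0 bx1 by0 by1 :=
      fun w hw => hz w (List.mem_cons_of_mem _ hw)
    rw [List.foldl_cons]
    rcases hstep : pvSweepStep boundary (o, b) z with ⟨o', b'⟩
    unfold pvSweepStep at hstep
    dsimp only at hstep
    split at hstep
    · obtain ⟨rfl, rfl⟩ := Prod.mk.injEq .. ▸ hstep; exact ih hz' o b ho
    · split at hstep
      · rename_i hno hnbr
        obtain ⟨rfl, rfl⟩ := Prod.mk.injEq .. ▸ hstep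
        have hzin : pvInB bx0 bx1 by0 by1 z := by
          have := (pv_mem_grid bx0 bx1 by0 by1 z).mp (hz z List.mem_cons_self)
          exact ⟨this.1, this.2.1, this.2.2.1, this.2.2.2⟩
        have hznb : z ∉ boundary := fun hm => hno (Or.inr (List.contains_iff_mem.mpr hm))
        have hPz : P z := by
          rcases hnbr with hc | hc | hc | hc
          · refine hP (z.1 - 1, z.2) z (ho _ (List.contains_iff_mem.mp hc))
              ⟨⟨(1, 0), by simp [pvNbrs], ?_⟩, hzin, hznb⟩
            show z = (z.1 - 1 + 1, z.2 + 0)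
            obtain ⟨a, b2⟩ := z; simp only [Prod.mk.injEq]; omega
          · refine hP (z.1 + 1, z.2) z (ho _ (List.contains_iff_mem.mp hc))
              ⟨⟨(-1, 0), by simp [pvNbrs], ?_⟩, hzin, hznb⟩
            show z = (z.1 + 1 + -1, z.2 + 0)
            obtain ⟨a, b2⟩ := z; simp only [Prod.mk.injEq]; omega
          · refine hP (z.1, z.2 - 1) z (ho _ (List.contains_iff_mem.mp hc))
              ⟨⟨(0, 1), by simp [pvNbrs], ?_⟩, hzin, hznb⟩
            show z = (z.1 + 0, z.2 - 1 + 1)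
            obtain ⟨a, b2⟩ := z; simp only [Prod.mk.injEq]; omega
          · refine hP (z.1, z.2 + 1) z (ho _ (List.contains_iff_mem.mp hc))
              ⟨⟨(0, -1), by simp [pvNbrs], ?_⟩, hzin, hznb⟩
            show z = (z.1 + 0, z.2 + 1 + -1)
            obtain ⟨a, b2⟩ := z; simp only [Prod.mk.injEq]; omega
        refine ih hz' _ _ ?_
        intro x hx
        rcases (PySem.Set.mem_add o z x).mp hx with hxo | rfl
        · exact ho x hxo
        · exact hPz
      · obtain ⟨rfl, rfl⟩ := Prod.mk.injEq .. ▸ hstep; exact ih hz' o b ho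

lemma pvSweepFold_fix (boundary : List (Int × Int)) :
    ∀ (cells : List (Int × Int)) (o : List (Int × Int)),
      (cells.foldl (pvSweepStep boundary) (o, false)).2 = false →
      (cells.foldl (pvSweepStep boundary) (o, false)).1 = o ∧
      ∀ z ∈ cells, z ∉ o → z ∉ boundary →
        ∀ δ ∈ pvNbrs, (z.1 + δ.1, z.2 + δ.2) ∉ o := by
  intro cells
  induction cells with
  | nil =>
    intro o _
    exact ⟨rfl, fun z hz => by simp at hz⟩
  | cons z cells ih =>
    intro o hfl
    rw [List.foldl_cons] at hfl ⊢
    rcases hstep : pvSweepStep boundary (o, false) z with ⟨o', b'⟩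
    rw [hstep] at hfl
    have hb' : b' = false := by
      by_contra hb
      rw [Bool.not_eq_false] at hb
      subst hb
      rw [pvSweepFold_flag boundary cells o'] at hfl
      simp at hfl
    subst hb'
    unfold pvSweepStep at hstep
    dsimp only at hstep
    split at hstep
    · rename_i hg1
      obtain ⟨rfl, -⟩ := Prod.mk.injEq .. ▸ hstep
      obtain ⟨hfix, hcl⟩ := ih o hfl
      refine ⟨hfix, ?_⟩
      intro w hw hwo hwb
      rcases List.mem_cons.mp hw with rfl | hw'
      · rcases hg1 with hc | hc
        · exact absurd (List.contains_iff_mem.mp hc) hwo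
        · exact absurd (List.contains_iff_mem.mp hc) hwb
      · exact hcl w hw' hwo hwb
    · split at hstep
      · exact absurd (Prod.mk.injEq .. ▸ hstep).2.symm (by simp)
      · rename_i hg1 hg2
        obtain ⟨rfl, -⟩ := Prod.mk.injEq .. ▸ hstep
        obtain ⟨hfix, hcl⟩ := ih o hfl
        refine ⟨hfix, ?_⟩
        intro w hw hwo hwb
        rcases List.mem_cons.mp hw with rfl | hw'
        · intro δ hδ hmem
          simp only [not_or] at hg2
          obtain ⟨n1, n2, n3, n4⟩ := hg2
          have hcont := List.contains_iff_mem.mpr hmem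
          simp only [pvNbrs, List.mem_cons, List.not_mem_nil, or_false] at hδ
          rcases hδ with rfl | rfl | rfl | rfl
          · refine n2 ?_
            have he : ((w.1 + 1, w.2 + 0) : Int × Int) = (w.1 + 1, w.2) := by simp
            rw [he] at hcont; exact hcont
          · refine n1 ?_
            have he : ((w.1 + -1, w.2 + 0) : Int × Int) = (w.1 - 1, w.2) := by
              simp only [Prod.mk.injEq]; omega
            rw [he] at hcont; exact hcont
          · refine n4 ?_
            have he : ((w.1 + 0, w.2 + 1) : Int × Int) = (w.1, w.2 + 1) := by simp
            rw [he] at hcont; exact hcont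
          · refine n3 ?_
            have he : ((w.1 + 0, w.2 + -1) : Int × Int) = (w.1, w.2 - 1) := by
              simp only [Prod.mk.injEq]; omega
            rw [he] at hcont; exact hcont
        · exact hcl w hw' hwo hwb

lemma pvSweepLoop_spec (bx0 bx1 by0 by1 : Int) (boundary : List (Int × Int))
    (P : Int × Int → Prop)
    (hP : ∀ c d, P c → pvStepRel bx0 bx1 by0 by1 boundary c d → P d) :
    ∀ (o : List (Int × Int)), (∀ x ∈ o, P x) →
    (∀ x ∈ o, x ∈ pvSweepLoop boundary (pvGrid bx0 bx1 by0 by1) o) ∧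
    (∀ x ∈ pvSweepLoop boundary (pvGrid bx0 bx1 by0 by1) o, P x) ∧
    (∀ x ∈ pvSweepLoop boundary (pvGrid bx0 bx1 by0 by1) o,
      ∀ d, pvStepRel bx0 bx1 by0 by1 boundary x d →
        d ∈ pvSweepLoop boundary (pvGrid bx0 bx1 by0 by1) o) := by
  intro o
  induction o using pvSweepLoop.induct boundary (pvGrid bx0 bx1 by0 by1) with
  | case1 o hfl ih =>
    rw [List.foldl_attach] at hfl ih
    intro ho
    rw [pvSweepLoop, if_pos hfl]
    have ho' : ∀ x ∈ (List.foldl (pvSweepStep boundary)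
        (o, false) (pvGrid bx0 bx1 by0 by1)).1, P x :=
      pvSweepFold_sound bx0 bx1 by0 by1 boundary P hP _ (fun z hz => hz) o false ho
    obtain ⟨c1, c2, c3⟩ := ih ho'
    exact ⟨fun x hx => c1 x (pvSweepFold_mono boundary _ o false x hx), c2, c3⟩
  | case2 o hfl =>
    rw [List.foldl_attach] at hfl
    rw [Bool.not_eq_true] at hfl
    intro ho
    rw [pvSweepLoop, if_neg (by rw [hfl]; simp)]
    obtain ⟨hfix, hcl⟩ := pvSweepFold_fix boundary (pvGrid bx0 bx1 by0 by1) o hfl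
    rw [hfix]
    refine ⟨fun x hx => hx, ho, ?_⟩
    intro x hx d hd
    obtain ⟨⟨δ, hδ, rfl⟩, hin, hnb⟩ := hd
    by_contra hdo
    have hdg : ((x.1 + δ.1, x.2 + δ.2) : Int × Int) ∈ pvGrid bx0 bx1 by0 by1 := by
      rw [pv_mem_grid]; exact ⟨hin.1, hin.2.1, hin.2.2.1, hin.2.2.2⟩
    have := hcl _ hdg hdo hnb (-δ.1, -δ.2) (pvNbrs_neg hδ)
    apply this
    have : ((x.1 + δ.1 + -δ.1, x.2 + δ.2 + -δ.2) : Int × Int) = x := by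
      obtain ⟨a, b⟩ := x; simp
    rw [this]
    exact hx

lemma pvSweep_mem (bx0 bx1 by0 by1 : Int) (boundary : List (Int × Int)) (x : Int × Int) :
    x ∈ pvSweepLoop boundary (pvGrid bx0 bx1 by0 by1)
        (PySem.Set.ofList [(bx0, by0)]) ↔
      Relation.ReflTransGen (pvStepRel bx0 bx1 by0 by1 boundary) (bx0, by0) x := by
  have hone : ∀ y : Int × Int, y ∈ (PySem.Set.ofList [((bx0 : Int), (by0 : Int))]) ↔ y = (bx0, by0) := by
    intro y
    rw [PySem.Set.mem_ofList]
    simp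
  obtain ⟨c1, c2, c3⟩ := pvSweepLoop_spec bx0 bx1 by0 by1 boundary
    (Relation.ReflTransGen (pvStepRel bx0 bx1 by0 by1 boundary) (bx0, by0))
    (fun c d hc hcd => hc.tail hcd)
    (PySem.Set.ofList [(bx0, by0)])
    (fun y hy => by rw [hone y] at hy; exact hy ▸ Relation.ReflTransGen.refl)
  constructor
  · exact c2 x
  · intro hr
    induction hr with
    | refl => exact c1 _ ((hone _).mpr rfl)
    | tail hr hstep ih => exact c3 _ ih _ hstep

lemma pvSet_union_nil {α : Type} [BEq α] (s : PySem.Set α) :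
    PySem.Set.union s PySem.Set.empty = s := rfl

lemma pvSet_union_add {α : Type} [BEq α] [LawfulBEq α] (s t : PySem.Set α) (c : α) :
    PySem.Set.union s (PySem.Set.add t c) = PySem.Set.add (PySem.Set.union s t) c := by
  by_cases h : t.contains c = true
  · have hadd : PySem.Set.add t c = t := by unfold PySem.Set.add; rw [if_pos h]
    have hc : (PySem.Set.union s t).contains c = true :=
      List.contains_iff_mem.mpr ((PySem.Set.mem_union s t c).mpr
        (Or.inr (List.contains_iff_mem.mp h)))
    rw [hadd]
    conv_rhs => unfold PySem.Set.add
    rw [if_pos hc]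
  · have hadd : PySem.Set.add t c = t ++ [c] := by unfold PySem.Set.add; rw [if_neg h]
    rw [hadd]
    show List.foldl PySem.Set.add s (t ++ [c]) = _
    rw [List.foldl_append]
    rfl

lemma pvSet_union_assoc {α : Type} [BEq α] [LawfulBEq α] (s t u : PySem.Set α) :
    PySem.Set.union s (PySem.Set.union t u) =
      PySem.Set.union (PySem.Set.union s t) u := by
  induction u generalizing t with
  | nil => rfl
  | cons c u ih =>
    show PySem.Set.union s (List.foldl PySem.Set.add t (c :: u)) =
      List.foldl PySem.Set.add (PySem.Set.union s t) (c :: u)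
    rw [List.foldl_cons, List.foldl_cons]
    have := ih (PySem.Set.add t c)
    show PySem.Set.union s (List.foldl PySem.Set.add (PySem.Set.add t c) u) =
      List.foldl PySem.Set.add (PySem.Set.add (PySem.Set.union s t) c) u
    rw [← pvSet_union_add]
    exact this

lemma pvSet_union_foldIf {α : Type} [BEq α] [LawfulBEq α] (p : α → Bool) :
    ∀ (g : List α) (s t : PySem.Set α),
      PySem.Set.union s (g.foldl (fun a c => if p c then PySem.Set.add a c else a) t) =
      g.foldl (fun a c => if p c then PySem.Set.add a c else a) (PySem.Set.union s t) := by
  intro g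
  induction g with
  | nil => intro s t; rfl
  | cons c g ih =>
    intro s t
    rw [List.foldl_cons, List.foldl_cons]
    by_cases h : p c = true
    · rw [if_pos h, if_pos h, ih, pvSet_union_add]
    · rw [if_neg h, if_neg h, ih]

lemma pvFold_shape (bset : PySem.Set (Int × Int)) (oset : List (Int × Int))
    (g : List (Int × Int)) (init : List (Int × Int)) :
    g.foldl (fun ig c => if bset.contains c then ig
      else if oset.contains c then ig else PySem.Set.add ig c) init =
    g.foldl (fun a c => if !bset.contains c && !oset.contains c
      then PySem.Set.add a c else a) init := by
  apply PySem.List.foldl_congr_mem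
  intro acc x _
  by_cases h1 : x ∈ bset
  · simp [h1]
  · by_cases h2 : x ∈ oset <;> simp [h1, h2]

lemma pvSegCells_eq (x1 y1 x2 y2 : Int) : pvSegCellsA x1 y1 x2 y2 = pvSegCellsB x1 y1 x2 y2 := by
  simp only [pvSegCellsA, pvSegCellsB, min_def, max_def]

lemma pvPairs_eq (points : List (Int × Int)) :
    points.zip (PySem.List.slice points (some 1) none ++
        PySem.List.slice points none (some 1)) =
    (List.range points.length).map (fun i =>
      (points.getD i (0, 0), points.getD ((i + 1) % points.length) (0, 0))) := by
  rw [PySem.List.slice_from_one, PySem.List.slice_to points (by norm_num)]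
  have h1 : ((1 : Int)).toNat = 1 := rfl
  rw [h1]
  apply List.ext_getElem
  · simp only [List.length_zip, List.length_append, List.length_tail, List.length_take,
      List.length_map, List.length_range]
    omega
  · intro i hi1 hi2
    simp only [List.length_map, List.length_range] at hi2
    rw [List.getElem_zip, List.getElem_map, List.getElem_range, Prod.mk.injEq]
    refine ⟨(List.getD_eq_getElem points (0, 0) hi2).symm, ?_⟩
    by_cases hlast : i + 1 < points.length
    · rw [List.getElem_append_left (by simp only [List.length_tail]; omega),
        List.getElem_tail, Nat.mod_eq_of_lt hlast,
        List.getD_eq_getElem points (0, 0) hlast]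
    · have hieq : i + 1 = points.length := by omega
      rw [List.getElem_append_right (by simp only [List.length_tail]; omega)]
      rw [hieq, Nat.mod_self]
      have h0 : 0 < points.length := by omega
      rw [List.getD_eq_getElem points (0, 0) h0, List.getElem_take]
      congr 1
      simp only [List.length_tail]
      omega

lemma pvEdge_eq (points : List (Int × Int)) : pvEdgeA points = pvEdgeB points := by
  unfold pvEdgeA pvEdgeB
  rw [pvPairs_eq, List.foldl_map]
  apply PySem.List.foldl_congr_mem
  intro acc i _
  dsimp only
  rw [pvSegCells_eq]

theorem pv_ports_eq (points : List (Int × Int)) :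
    build_allowed_tiles points = build_allowed_tiles_alt points := by
  unfold build_allowed_tiles build_allowed_tiles_alt
  simp only [pvEdge_eq]
  set E := pvEdgeB points with hE
  set R := PySem.Set.ofList points with hR
  set BND := PySem.Set.union R E with hBND
  set minx := (PySem.List.min? (BND.map Prod.fst) id).getD 0 with hminx
  set maxx := (PySem.List.max? (BND.map Prod.fst) id).getD 0 with hmaxx
  set miny := (PySem.List.min? (BND.map Prod.snd) id).getD 0 with hminy
  set maxy := (PySem.List.max? (BND.map Prod.snd) id).getD 0 with hmaxy
  set OA := pvBfs (minx - 1) (maxx + 1) (miny - 1) (maxy + 1) BND PySem.Set.empty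
    (PySem.Set.ofList [(minx - 1, miny - 1)]) [(minx - 1, miny - 1)] with hOA
  set OB := pvSweepLoop BND (pvGrid (minx - 1) (maxx + 1) (miny - 1) (maxy + 1))
    (PySem.Set.ofList [(minx - 1, miny - 1)]) with hOB
  have hmem : ∀ c : Int × Int, OA.contains c = OB.contains c := by
    intro c
    apply Bool.eq_iff_iff.mpr
    rw [List.contains_iff_mem, List.contains_iff_mem, hOA, hOB]
    exact Iff.trans (pvBfs_mem (minx - 1) (maxx + 1) (miny - 1) (maxy + 1) BND c)
      (pvSweep_mem (minx - 1) (maxx + 1) (miny - 1) (maxy + 1) BND c).symm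
  have h1 : PySem.Set.union R (PySem.Set.union E
      ((pvGrid minx maxx miny maxy).foldl (fun ig c =>
        if BND.contains c then ig
        else if OA.contains c then ig
        else PySem.Set.add ig c) PySem.Set.empty)) =
      (pvGrid minx maxx miny maxy).foldl (fun al c =>
        if !BND.contains c && !OB.contains c then PySem.Set.add al c else al)
        (PySem.Set.union R E) := by
    rw [pvSet_union_assoc, pvFold_shape, pvSet_union_foldIf, pvSet_union_nil, ← hBND]
    apply PySem.List.foldl_congr_mem
    intro acc x _
    rw [hmem x]
  rw [h1]

-- ===== VERDICT (by name: the statement is the Claim_ definition above) =====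
theorem build_allowed_tiles_spec : Claim_equal_build_allowed_tiles := by
  unfold Claim_equal_build_allowed_tiles Spec_build_allowed_tiles
  intro points _ _
  exact pv_ports_eq points
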